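-- pv_equiv track=rewrite | github.com/kserm/yapr_algorithms_3 | 15_trash_index_diff.py | double_combinations
-- ===== SOURCE A (Python) =====
-- def double_combinations(arr):
--     n = len(arr)
--     comb = []
--     l_i = list(range(n))
--     l_j = list(range(n))
--     for i in l_i:
--         for j in l_j:
--             flag = False
--             for item in comb:
--                 if i in item and j in item:
--                     flag = True
--                     break
--             if flag == False and i != j:
--                 comb.append((i, j))
--     return comb
-- ===== SOURCE B (Python) =====
-- def double_combinations(arr):
--     n = len(arr)
--     return [(i, j) for i in range(n) for j in range(i + 1, n)]
-- ===== Notes on version B (the rewrite author's own statement) =====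
-- stated objective: faster
-- what changed: A's redundancy check (scanning the accumulated list of pairs for each (i,j)) is removed entirely: B emits (i,j) directly for i<j in one double comprehension, since every j<=i pair is always rejected by A's scan.
import Mathlib
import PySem

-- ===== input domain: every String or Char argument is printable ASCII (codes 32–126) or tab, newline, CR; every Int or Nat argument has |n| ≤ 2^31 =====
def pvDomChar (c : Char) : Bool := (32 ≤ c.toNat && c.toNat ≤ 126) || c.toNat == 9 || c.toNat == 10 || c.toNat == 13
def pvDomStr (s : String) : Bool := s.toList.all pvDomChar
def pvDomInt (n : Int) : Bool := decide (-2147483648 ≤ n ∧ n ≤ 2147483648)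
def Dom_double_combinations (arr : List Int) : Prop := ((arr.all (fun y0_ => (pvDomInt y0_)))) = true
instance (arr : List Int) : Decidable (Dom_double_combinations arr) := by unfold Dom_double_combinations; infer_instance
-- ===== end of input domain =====

-- B removes A's O(n^2) rescan of the accumulated pair list for every (i, j) and emits
-- the pairs (i, j) with i < j directly (A's scan rejects exactly the pairs with j ≤ i);
-- objective: faster (O(n^2) instead of O(n^4)).

-- ===== PORT A =====
def double_combinations (arr : List Int) : List (Int × Int) :=
  let n : Int := (arr.length : Int)
  let comb : List (Int × Int) := []
  let l_i := PySem.List.pyRange 0 n 1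
  let l_j := PySem.List.pyRange 0 n 1
  l_i.foldl (fun comb i =>
    l_j.foldl (fun comb j =>
      -- the Python for/break loop over comb computes exactly this existential
      let flag := comb.any (fun item =>
        (i == item.1 || i == item.2) && (j == item.1 || j == item.2))
      if flag == false && i != j then comb ++ [(i, j)] else comb) comb) comb

-- ===== PORT B =====
def double_combinations_alt (arr : List Int) : List (Int × Int) :=
  let n : Int := (arr.length : Int)
  (PySem.List.pyRange 0 n 1).flatMap (fun i =>
    (PySem.List.pyRange (i + 1) n 1).map (fun j => (i, j)))

-- ===== PRECONDITION & SPEC =====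
def Spec_double_combinations (arr : List Int) (out : List (Int × Int)) : Prop := out = double_combinations_alt arr
instance (arr : List Int) (out : List (Int × Int)) : Decidable (Spec_double_combinations arr out) := by unfold Spec_double_combinations; infer_instance

-- ===== CLAIM (what is proved, stated in full; the proofs are below) =====
def Claim_equal_double_combinations : Prop := ∀ (arr : List Int), Dom_double_combinations arr → Spec_double_combinations arr (double_combinations arr)

-- ===== LEMMAS AND PROOFS =====

-- A's inner-loop body, with outer index k fixed.
def pvStep (k : Int) (comb : List (Int × Int)) (j : Int) : List (Int × Int) :=
  let flag := comb.any (fun item =>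
    (k == item.1 || k == item.2) && (j == item.1 || j == item.2))
  if flag == false && k != j then comb ++ [(k, j)] else comb

-- the row of pairs (k, b) for k < b < n
def pvRow (n k : Int) : List (Int × Int) :=
  (PySem.List.pyRange (k + 1) n 1).map (fun j => (k, j))

-- all pairs (a, b) with a < m, a < b < n
def pvTarget (n m : Int) : List (Int × Int) :=
  (PySem.List.pyRange 0 m 1).flatMap (fun i => pvRow n i)

lemma mem_pvRow {n k : Int} {p : Int × Int} :
    p ∈ pvRow n k ↔ p.1 = k ∧ k < p.2 ∧ p.2 < n := by
  simp only [pvRow, List.mem_map, PySem.List.mem_pyRange_one]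
  constructor
  · rintro ⟨j, ⟨h1, h2⟩, rfl⟩; exact ⟨rfl, by omega, h2⟩
  · rintro ⟨h1, h2, h3⟩
    exact ⟨p.2, ⟨by omega, h3⟩, by rw [← h1]⟩

lemma mem_pvTarget {n m : Int} {p : Int × Int} :
    p ∈ pvTarget n m ↔ 0 ≤ p.1 ∧ p.1 < m ∧ p.1 < p.2 ∧ p.2 < n := by
  simp only [pvTarget, List.mem_flatMap, PySem.List.mem_pyRange_one, mem_pvRow]
  constructor
  · rintro ⟨i, ⟨h0, hm⟩, rfl, h2, h3⟩; exact ⟨h0, hm, h2, h3⟩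
  · rintro ⟨h0, hm, h2, h3⟩; exact ⟨p.1, ⟨h0, hm⟩, rfl, h2, h3⟩

-- inner-loop invariant: processing j..n-1 with the row filled up to j completes row k
lemma pv_inner (n k : Int) (hk0 : 0 ≤ k) (hkn : k < n) :
    ∀ (d : Nat) (j : Int), 0 ≤ j → j ≤ n → (n - j).toNat = d →
    (PySem.List.pyRange j n 1).foldl (pvStep k)
        (pvTarget n k ++ (PySem.List.pyRange (k + 1) j 1).map (fun b => (k, b)))
      = pvTarget n k ++ pvRow n k := by
  intro d
  induction d with
  | zero =>
    intro j hj0 hjn hd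
    have hjn' : j = n := by omega
    subst hjn'
    rw [PySem.List.pyRange_one_eq_nil le_rfl]
    simp [pvRow]
  | succ d ih =>
    intro j hj0 hjn hd
    have hjlt : j < n := by omega
    rw [PySem.List.pyRange_one_cons hjlt, List.foldl_cons]
    by_cases hcase : j < k
    · -- (j, k) is already in pvTarget n k, so flag = true and nothing is appended
      have hmem : ((j, k) : Int × Int) ∈ pvTarget n k := by
        rw [mem_pvTarget]; exact ⟨hj0, hcase, hcase, hkn⟩
      have hflag : (pvTarget n k ++ (PySem.List.pyRange (k + 1) j 1).map (fun b => (k, b))).any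
          (fun item => (k == item.1 || k == item.2) && (j == item.1 || j == item.2)) = true := by
        rw [List.any_eq_true]
        exact ⟨(j, k), List.mem_append_left _ hmem, by simp⟩
      have hstep : pvStep k (pvTarget n k ++ (PySem.List.pyRange (k + 1) j 1).map (fun b => (k, b))) j
          = pvTarget n k ++ (PySem.List.pyRange (k + 1) j 1).map (fun b => (k, b)) := by
        simp [pvStep, hflag]
      rw [hstep]
      have hrow : PySem.List.pyRange (k + 1) (j + 1) 1 = PySem.List.pyRange (k + 1) j 1 := by
        rw [PySem.List.pyRange_one_eq_nil (by omega), PySem.List.pyRange_one_eq_nil (by omega)]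
      have := ih (j + 1) (by omega) (by omega) (by omega)
      rw [hrow] at this
      exact this
    · by_cases heq : j = k
      · -- i == j: nothing is appended
        subst heq
        have hstep : pvStep j (pvTarget n j ++ (PySem.List.pyRange (j + 1) j 1).map (fun b => (j, b))) j
            = pvTarget n j ++ (PySem.List.pyRange (j + 1) j 1).map (fun b => (j, b)) := by
          simp [pvStep]
        rw [hstep]
        have hrow : PySem.List.pyRange (j + 1) (j + 1) 1 = PySem.List.pyRange (j + 1) j 1 := by
          rw [PySem.List.pyRange_one_eq_nil (by omega), PySem.List.pyRange_one_eq_nil (by omega)]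
        have := ih (j + 1) (by omega) (by omega) (by omega)
        rw [hrow] at this
        exact this
      · -- k < j: no existing pair contains both k and j, so (k, j) is appended
        have hkj : k < j := by omega
        have hflag : (pvTarget n k ++ (PySem.List.pyRange (k + 1) j 1).map (fun b => (k, b))).any
            (fun item => (k == item.1 || k == item.2) && (j == item.1 || j == item.2)) = false := by
          rw [List.any_eq_false]
          intro p hp
          rcases List.mem_append.mp hp with hp | hp
          · rw [mem_pvTarget] at hp
            simp only [Bool.and_eq_true, Bool.or_eq_true, beq_iff_eq]
            rintro ⟨h1 | h1, h2 | h2⟩ <;> omega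
          · rcases List.mem_map.mp hp with ⟨b, hb, rfl⟩
            rw [PySem.List.mem_pyRange_one] at hb
            simp only [Bool.and_eq_true, Bool.or_eq_true, beq_iff_eq]
            rintro ⟨h1 | h1, h2 | h2⟩ <;> omega
        have hstep : pvStep k (pvTarget n k ++ (PySem.List.pyRange (k + 1) j 1).map (fun b => (k, b))) j
            = pvTarget n k ++ (PySem.List.pyRange (k + 1) (j + 1) 1).map (fun b => (k, b)) := by
          simp only [pvStep, hflag]
          rw [PySem.List.pyRange_one_succ_right (by omega)]
          simp [List.append_assoc, hkj.ne]
        rw [hstep]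
        exact ih (j + 1) (by omega) (by omega) (by omega)

-- outer-loop invariant
lemma pv_outer (n : Int) (hn : 0 ≤ n) :
    ∀ (d : Nat) (m : Int), 0 ≤ m → m ≤ n → (n - m).toNat = d →
    (PySem.List.pyRange m n 1).foldl
        (fun comb i => (PySem.List.pyRange 0 n 1).foldl (pvStep i) comb)
        (pvTarget n m)
      = pvTarget n n := by
  intro d
  induction d with
  | zero =>
    intro m hm0 hmn hd
    have : m = n := by omega
    subst this
    rw [PySem.List.pyRange_one_eq_nil le_rfl]
    rfl
  | succ d ih =>
    intro m hm0 hmn hd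
    have hmlt : m < n := by omega
    rw [PySem.List.pyRange_one_cons hmlt, List.foldl_cons]
    have h0 : (PySem.List.pyRange (m + 1) 0 1).map (fun b => ((m : Int), b)) = [] := by
      rw [PySem.List.pyRange_one_eq_nil (by omega)]; rfl
    have hinner := pv_inner n m hm0 hmlt (n - 0).toNat 0 (le_refl 0) hn rfl
    rw [h0, List.append_nil] at hinner
    rw [hinner]
    have hnext : pvTarget n m ++ pvRow n m = pvTarget n (m + 1) := by
      rw [pvTarget, pvTarget, PySem.List.pyRange_one_succ_right hm0, List.flatMap_append]
      simp
    rw [hnext]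
    exact ih (m + 1) (by omega) (by omega) (by omega)

-- ===== VERDICT (by name: the statement is the Claim_ definition above) =====
theorem double_combinations_spec : Claim_equal_double_combinations := by
  intro arr _
  unfold Spec_double_combinations double_combinations double_combinations_alt
  have hn : (0 : Int) ≤ (arr.length : Int) := by positivity
  have h0 : pvTarget (arr.length : Int) 0 = [] := by
    rw [pvTarget, PySem.List.pyRange_one_eq_nil (le_refl 0)]; rfl
  have := pv_outer (arr.length : Int) hn ((arr.length : Int) - 0).toNat 0 (le_refl 0) hn rfl
  rw [h0] at this
  simp only []
  rw [show (fun (comb : List (Int × Int)) (i : Int) =>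
        (PySem.List.pyRange 0 (arr.length : Int) 1).foldl
          (fun comb j =>
            let flag := comb.any (fun item =>
              (i == item.1 || i == item.2) && (j == item.1 || j == item.2))
            if flag == false && i != j then comb ++ [(i, j)] else comb) comb)
      = (fun comb i => (PySem.List.pyRange 0 (arr.length : Int) 1).foldl (pvStep i) comb) from rfl]
  rw [this]
  rw [pvTarget]
  rfl
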